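-- pv_equiv track=rewrite | github.com/sowmyamanojna/BT3051-Data-Structures-and-Algorithms | lab_session/reverse_string.py | rev_str
-- ===== SOURCE A (Python) =====
-- def rev_str(x):
-- 	n = len(x)
-- 	b = [x[i] for i in range(n-1, -1, -1)]
-- 	y = ""
-- 	for i in b:
-- 		y += i
-- 	print (y)
-- 	return y
-- ===== SOURCE B (Python) =====
-- def rev_str(x):
-- 	buf = list(x)
-- 	n = len(buf)
-- 	for i in range(n // 2):
-- 		buf[i], buf[n - 1 - i] = buf[n - 1 - i], buf[i]
-- 	y = "".join(buf)
-- 	print(y)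
-- 	return y
-- ===== Notes on version B (the rewrite author's own statement) =====
-- stated objective: alternative
-- what changed: Replaces A's back-to-front index loop that copies every character into a new list and then concatenates them one by one with an in-place two-pointer loop that swaps buf[i] with buf[n-1-i] for i < n//2 and joins once.
import Mathlib
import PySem

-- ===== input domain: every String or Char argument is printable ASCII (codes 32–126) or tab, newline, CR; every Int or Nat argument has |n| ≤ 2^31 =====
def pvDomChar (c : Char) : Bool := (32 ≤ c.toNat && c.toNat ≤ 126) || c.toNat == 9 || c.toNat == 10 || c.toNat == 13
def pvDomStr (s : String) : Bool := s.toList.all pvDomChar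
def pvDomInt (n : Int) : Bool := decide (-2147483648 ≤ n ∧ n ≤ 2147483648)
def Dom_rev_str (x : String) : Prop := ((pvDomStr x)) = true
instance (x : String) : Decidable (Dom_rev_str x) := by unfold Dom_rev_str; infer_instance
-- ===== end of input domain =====

-- B reverses with an in-place two-pointer swap loop (swap buf[i] and buf[n-1-i] for i < n//2,
-- then one join) instead of A's back-to-front index loop with character-by-character
-- concatenation; return value only (both Pythons also print the result).

-- ===== PORT A =====
-- n = len(x); b = [x[i] for i in range(n-1, -1, -1)]; y = ""; for i in b: y += i
def rev_str (x : String) : String :=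
  let cs := x.toList
  let n : Int := PySem.Str.len x
  let b := (PySem.List.pyRange (n - 1) (-1) (-1)).map (fun i => PySem.List.pyGetD cs i ' ')
  String.ofList (b.foldl (fun acc c => acc ++ [c]) ([] : List Char))

-- ===== PORT B =====
-- buf = list(x); n = len(buf); for i in range(n // 2): buf[i], buf[n-1-i] = buf[n-1-i], buf[i]
-- y = "".join(buf)
def rev_str_alt (x : String) : String :=
  let buf0 := x.toList
  let n : Int := PySem.List.len buf0
  let buf := (PySem.List.pyRange 0 (PySem.Int.floordiv n 2) 1).foldl
    (fun buf i =>
      PySem.List.pySetD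
        (PySem.List.pySetD buf i (PySem.List.pyGetD buf (n - 1 - i) ' '))
        (n - 1 - i) (PySem.List.pyGetD buf i ' '))
    buf0
  String.ofList buf

-- ===== PRECONDITION & SPEC =====
def Spec_rev_str (x : String) (out : String) : Prop := out = rev_str_alt x
instance (x : String) (out : String) : Decidable (Spec_rev_str x out) := by unfold Spec_rev_str; infer_instance

-- ===== CLAIM (what is proved, stated in full; the proofs are below) =====
def Claim_equal_rev_str : Prop := ∀ (x : String), Dom_rev_str x → Spec_rev_str x (rev_str x)

-- ===== LEMMAS AND PROOFS =====

-- A's loop builds exactly the reversed character list.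
lemma revA_eq_reverse (cs : List Char) :
    ((PySem.List.pyRange ((cs.length : Int) - 1) (-1) (-1)).map
        (fun i => PySem.List.pyGetD cs i ' ')).foldl (fun acc c => acc ++ [c]) [] =
      cs.reverse := by
  rw [PySem.List.foldl_append_singleton_eq_self]
  have hr : PySem.List.pyRange ((cs.length : Int) - 1) (-1) (-1) =
      (PySem.List.pyRange 0 (PySem.List.len cs)).reverse := by
    rw [PySem.List.pyRange_neg_one_eq_reverse]
    norm_num [PySem.List.len_eq]
  rw [hr, List.map_reverse, PySem.List.map_pyGetD_pyRange_zero]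
  simp

-- reading the element after a known prefix
lemma getD_append_cons (P R : List Char) (a d : Char) :
    (P ++ a :: R).getD P.length d = a := by
  induction P with
  | nil => rfl
  | cons p P ih => simp

-- writing the element after a known prefix
lemma set_append_cons (P R : List Char) (a b : Char) :
    (P ++ a :: R).set P.length b = P ++ b :: R := by
  induction P with
  | nil => rfl
  | cons p P ih => simp [ih]

-- one iteration of B's loop on a list split at positions i = |P| and j = |P| + |M| + 1
lemma swap_step (P M S : List Char) (a b : Char) :
    ((P ++ a :: (M ++ b :: S)).set P.length b).set (P.length + (M.length + 1)) a =
      P ++ b :: (M ++ a :: S) := by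
  rw [set_append_cons]
  have h1 : P ++ b :: (M ++ b :: S) = (P ++ b :: M) ++ b :: S := by simp
  have h2 : P.length + (M.length + 1) = (P ++ b :: M).length := by simp
  rw [h1, h2, set_append_cons]
  simp

-- the two reads of one iteration
lemma get_i (P M S : List Char) (a b d : Char) :
    (P ++ a :: (M ++ b :: S)).getD P.length d = a := getD_append_cons ..

lemma get_j (P M S : List Char) (a b d : Char) :
    (P ++ a :: (M ++ b :: S)).getD (P.length + (M.length + 1)) d = b := by
  have h1 : P ++ a :: (M ++ b :: S) = (P ++ a :: M) ++ b :: S := by simp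
  have h2 : P.length + (M.length + 1) = (P ++ a :: M).length := by simp
  rw [h1, h2, getD_append_cons]

-- loop invariant: after k swaps the outer k characters on each side are exchanged
lemma loop_inv (cs : List Char) (k : Nat) (hk : 2 * k ≤ cs.length) :
    (PySem.List.pyRange 0 (k : Int) 1).foldl
      (fun buf i =>
        PySem.List.pySetD
          (PySem.List.pySetD buf i
            (PySem.List.pyGetD buf ((PySem.List.len cs) - 1 - i) ' '))
          ((PySem.List.len cs) - 1 - i) (PySem.List.pyGetD buf i ' '))
      cs =
    (cs.drop (cs.length - k)).reverse ++ (cs.drop k).take (cs.length - 2 * k) ++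
      (cs.take k).reverse := by
  induction k with
  | zero =>
      simp [PySem.List.pyRange, List.take_of_length_le]
  | succ k ih =>
      have hk' : 2 * k ≤ cs.length := by omega
      have hcast : ((k + 1 : Nat) : Int) = (k : Int) + 1 := by omega
      rw [hcast, PySem.List.pyRange_one_succ_right (by positivity), List.foldl_append,
        ih hk']
      -- name the three segments
      set N := cs.length with hN
      have hkN : k < N := by omega
      have hjN : N - 1 - k < N := by omega
      have hkj : k < N - 1 - k := by omega
      set P := (cs.drop (N - k)).reverse with hP
      set S := (cs.take k).reverse with hS
      have hPlen : P.length = k := by simp [hP]; omega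
      -- split the middle segment as a :: M ++ [b]
      set M := (cs.drop (k + 1)).take (N - 2 * (k + 1)) with hM
      have hMlen : M.length = N - 2 * (k + 1) := by simp [hM]; omega
      have hmid : (cs.drop k).take (N - 2 * k) = cs[k] :: (M ++ [cs[N - 1 - k]]) := by
        rw [List.drop_eq_getElem_cons hkN]
        have h1 : N - 2 * k = (N - 2 * k - 1) + 1 := by omega
        rw [h1, List.take_succ_cons]
        have h2 : N - 2 * k - 1 = (N - 2 * (k + 1)) + 1 := by omega
        rw [h2, List.take_succ, ← hM]
        have h3 : (cs.drop (k + 1))[N - 2 * (k + 1)]? = some cs[N - 1 - k] := by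
          rw [List.getElem?_drop]
          have : k + 1 + (N - 2 * (k + 1)) = N - 1 - k := by omega
          rw [this, List.getElem?_eq_getElem hjN]
        rw [h3]
        rfl
      rw [hmid]
      -- indices as Nat casts
      have hi : PySem.List.len cs - 1 - (k : Int) = ((N - 1 - k : Nat) : Int) := by
        simp [PySem.List.len_eq, hN]; omega
      have hassoc : P ++ (cs[k] :: (M ++ [cs[N - 1 - k]])) ++ S =
          P ++ cs[k] :: (M ++ cs[N - 1 - k] :: S) := by simp
      have hidxj : N - 1 - k = P.length + (M.length + 1) := by
        rw [hPlen, hMlen]; omega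
      rw [hassoc]
      simp only [List.foldl_cons, List.foldl_nil]
      rw [hi]
      simp only [PySem.List.pyGetD_natCast, PySem.List.pySetD_natCast]
      set a := cs[k] with ha
      set b := cs[N - 1 - k] with hb
      rw [hidxj, ← hPlen]
      rw [get_i, get_j, swap_step, hPlen]
      -- re-assemble as the (k+1)-invariant
      have hP' : (cs.drop (N - (k + 1))).reverse = P ++ [b] := by
        have e1 : N - (k + 1) = N - 1 - k := by omega
        have e2 : N - 1 - k + 1 = N - k := by omega
        rw [e1, List.drop_eq_getElem_cons hjN, e2, ← hb]
        simp [hP]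
      have hS' : (cs.take (k + 1)).reverse = a :: S := by
        rw [List.take_succ, List.getElem?_eq_getElem hkN, ← ha]
        simp [hS]
      rw [hP', hS']
      simp

-- B's loop result equals the full reverse
lemma revB_eq_reverse (cs : List Char) :
    (PySem.List.pyRange 0 (PySem.Int.floordiv (PySem.List.len cs) 2) 1).foldl
      (fun buf i =>
        PySem.List.pySetD
          (PySem.List.pySetD buf i
            (PySem.List.pyGetD buf ((PySem.List.len cs) - 1 - i) ' '))
          ((PySem.List.len cs) - 1 - i) (PySem.List.pyGetD buf i ' '))
      cs = cs.reverse := by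
  set N := cs.length with hN
  have hfd : PySem.Int.floordiv (PySem.List.len cs) 2 = ((N / 2 : Nat) : Int) := by
    rw [PySem.List.len_eq]
    exact_mod_cast PySem.Int.floordiv_natCast N 2
  rw [hfd, loop_inv cs (N / 2) (by omega)]
  rcases Nat.even_or_odd N with ⟨m, hm⟩ | ⟨m, hm⟩
  · have h2 : N / 2 = m := by omega
    have h0 : N - 2 * (N / 2) = 0 := by omega
    have hd : N - N / 2 = N / 2 := by omega
    rw [h0, hd]
    simp only [List.take_zero, List.append_nil]
    rw [← List.reverse_append, List.take_append_drop]
  · have h2 : N / 2 = m := by omega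
    have h1 : N - 2 * (N / 2) = 1 := by omega
    have hd : N - N / 2 = N / 2 + 1 := by omega
    have hmN : N / 2 < N := by omega
    rw [h1, hd]
    have hone : (cs.drop (N / 2)).take 1 = [cs[N / 2]] := by
      rw [show (1 : Nat) = 0 + 1 from rfl, List.take_succ]
      simp [List.getElem?_drop, List.getElem?_eq_getElem hmN]
    have hdm : (cs.drop (N / 2)).reverse =
        (cs.drop (N / 2 + 1)).reverse ++ [cs[N / 2]] := by
      rw [List.drop_eq_getElem_cons hmN]; simp
    rw [hone, List.append_assoc]
    have hlast : (cs.take (N / 2 + 1)).reverse =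
        [cs[N / 2]] ++ (cs.take (N / 2)).reverse := by
      rw [List.take_succ, List.getElem?_eq_getElem hmN]
      simp
    rw [← hlast, ← List.reverse_append, List.take_append_drop]

-- ===== VERDICT (by name: the statement is the Claim_ definition above) =====
theorem rev_str_spec : Claim_equal_rev_str := by
  intro x _
  show rev_str x = rev_str_alt x
  simp only [rev_str, rev_str_alt]
  rw [revB_eq_reverse x.toList]
  have hlen : PySem.Str.len x = ((x.toList.length : Nat) : Int) := by
    simp [PySem.Str.len_eq]
  rw [hlen, revA_eq_reverse]
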